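-- pv_equiv track=rewrite | github.com/sqlinkgit/SQLink_RPI0W-Update | update_svx_full.py | update_key_in_lines
-- ===== SOURCE A (Python) =====
-- def update_key_in_lines(lines, section, key, value):
--     new_lines = []
--     in_section = False
--     key_updated = False
--
--     section_header = f"[{section}]"
--
--     section_exists = any(line.strip() == section_header for line in lines)
--     if not section_exists:
--         lines.append(f"\n{section_header}\n")
--
--     for line in lines:
--         stripped = line.strip()
--         if stripped.startswith("[") and stripped.endswith("]"):
--             in_section = (stripped == section_header)
--
--         if in_section and "=" in stripped and not stripped.startswith(("#", ";")):
--             parts = stripped.split("=", 1)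
--             current_key = parts[0].strip()
--
--             if current_key == key:
--                 if not key_updated:
--                     new_lines.append(f"{key}={value}\n")
--                     key_updated = True
--                 else:
--                     pass
--                 continue
--
--         new_lines.append(line)
--
--     if not key_updated:
--         final_lines = []
--         in_tgt_sec = False
--         added = False
--         for l in new_lines:
--             s = l.strip()
--             if s == section_header:
--                 in_tgt_sec = True
--                 final_lines.append(l)
--                 continue
--             if in_tgt_sec and s.startswith("["):
--                 if not added:
--                     final_lines.append(f"{key}={value}\n")
--                     added = True
--                 in_tgt_sec = False
--             final_lines.append(l)
--         if in_tgt_sec and not added: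
--              final_lines.append(f"{key}={value}\n")
--              added = True
--         return final_lines
--
--     return new_lines
-- ===== SOURCE B (Python) =====
-- def update_key_in_lines(lines, section, key, value):
--     header = "[" + section + "]"
--     if all(l.strip() != header for l in lines):
--         lines.append("\n" + header + "\n")
--     kv = key + "=" + value + "\n"
--     stripped = [l.strip() for l in lines]
--
--     flags = []
--     cur = False
--     for s in stripped:
--         if s.startswith("[") and s.endswith("]"):
--             cur = (s == header)
--         flags.append(cur)
--     tagged = list(zip(stripped, flags))
--
--     def is_key_line(s):
--         return "=" in s and not s.startswith(("#", ";")) and s.split("=", 1)[0].strip() == key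
--
--     k = next((i for i, (s, f) in enumerate(tagged) if f and is_key_line(s)), None)
--     if k is not None:
--         kept = [l for l, (s, f) in zip(lines[k+1:], tagged[k+1:]) if not (f and is_key_line(s))]
--         return lines[:k] + [kv] + kept
--
--     i0 = next(i for i, s in enumerate(stripped) if s == header)
--     off = next((t for t, s in enumerate(stripped[i0+1:])
--                 if s.startswith("[") and s != header), None)
--     j = i0 + 1 + off if off is not None else len(lines)
--     return lines[:j] + [kv] + lines[j:]
-- ===== Notes on version B (the rewrite author's own statement) =====
-- stated objective: alternative
-- what changed: A's two sequential state-machine passes (replace/drop loop with in_section/key_updated flags, then an insertion loop with in_tgt_sec/added flags) are replaced by a precomputed per-line section-membership array plus index searches: find the first matching key line and splice/filter there, or find the insertion index after the section header and splice the new line in by list slicing.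
import Mathlib
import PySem

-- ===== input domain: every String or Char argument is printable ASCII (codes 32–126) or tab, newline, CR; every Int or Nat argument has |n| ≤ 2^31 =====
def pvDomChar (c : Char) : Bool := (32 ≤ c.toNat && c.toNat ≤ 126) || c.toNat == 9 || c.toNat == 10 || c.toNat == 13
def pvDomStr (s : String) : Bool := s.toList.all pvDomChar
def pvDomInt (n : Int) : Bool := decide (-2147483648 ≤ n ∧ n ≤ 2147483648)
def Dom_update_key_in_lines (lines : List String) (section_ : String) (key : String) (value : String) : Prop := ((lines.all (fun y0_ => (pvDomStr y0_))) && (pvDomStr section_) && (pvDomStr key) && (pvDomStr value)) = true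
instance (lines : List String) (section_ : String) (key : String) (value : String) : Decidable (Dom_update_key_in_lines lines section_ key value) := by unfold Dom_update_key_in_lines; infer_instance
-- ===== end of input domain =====

-- B replaces A's two sequential state-machine passes by a precomputed membership array
-- plus "find the index, then splice" (objective: alternative, same cost).
-- Python A mutates `lines` (appends the section header when missing); Python B performs
-- the SAME mutation; the equivalence proved here is about the return value.

-- ===== PORT A =====
-- A's first loop: state (in_section, key_updated), returns (new_lines, key_updated)
def loopA (header key kv : String) : List String → Bool → Bool → List String × Bool
  | [], _, upd => ([], upd)
  | l :: rest, inSec, upd =>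
    let s := PySem.Str.strip l
    let inSec' := if PySem.Str.startswith s "[" && PySem.Str.endswith s "]" then s == header else inSec
    if inSec' && PySem.Str.isIn "=" s && !(PySem.Str.startswith s "#" || PySem.Str.startswith s ";") then
      let parts := (PySem.Str.splitMax? s "=" 1).getD []
      let currentKey := PySem.Str.strip (parts.headD "")
      if currentKey == key then
        let r := loopA header key kv rest inSec' true
        if !upd then (kv :: r.1, r.2) else r
      else
        let r := loopA header key kv rest inSec' upd
        (l :: r.1, r.2)
    else
      let r := loopA header key kv rest inSec' upd
      (l :: r.1, r.2)

-- A's second (insertion) loop: state (in_tgt_sec, added); A's trailing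
-- 'if in_tgt_sec and not added: append' is the base case
def loopA2 (header kv : String) : List String → Bool → Bool → List String
  | [], inT, added => if inT && !added then [kv] else []
  | l :: rest, inT, added =>
    let s := PySem.Str.strip l
    if s == header then l :: loopA2 header kv rest true added
    else if inT && PySem.Str.startswith s "[" then
      if !added then kv :: l :: loopA2 header kv rest false true
      else l :: loopA2 header kv rest false added
    else l :: loopA2 header kv rest inT added

def update_key_in_lines (lines : List String) (section_ : String) (key : String) (value : String) : List String :=
  let header := "[" ++ section_ ++ "]"
  let lines1 := if lines.any (fun l => PySem.Str.strip l == header) then lines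
                else lines ++ ["\n" ++ header ++ "\n"]
  let kv := key ++ "=" ++ value ++ "\n"
  let r := loopA header key kv lines1 false false
  if !r.2 then loopA2 header kv r.1 false false else r.1

-- ===== PORT B =====
-- Source B's flag loop over the stripped lines: flags[i] = "line i is inside the target section"
def flagsB (header : String) : List String → Bool → List Bool
  | [], _ => []
  | s :: rest, cur =>
    let cur' := if PySem.Str.startswith s "[" && PySem.Str.endswith s "]" then s == header else cur
    cur' :: flagsB header rest cur'

-- Source B's is_key_line (argument is an already-stripped line)
def isKeyLineB (key s : String) : Bool :=
  PySem.Str.isIn "=" s && !(PySem.Str.startswith s "#" || PySem.Str.startswith s ";") &&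
    (PySem.Str.strip (((PySem.Str.splitMax? s "=" 1).getD []).headD "") == key)

-- Source B's 'next((i for i, x in enumerate(xs) if cond), default)' is ported as List.findIdx?;
-- slices lines[:j] / lines[j:] with 0 ≤ j ≤ len are List.take / List.drop (exact there)
def update_key_in_lines_alt (lines : List String) (section_ : String) (key : String) (value : String) : List String :=
  let header := "[" ++ section_ ++ "]"
  let lines1 := if lines.all (fun l => !(PySem.Str.strip l == header)) then
                  lines ++ ["\n" ++ header ++ "\n"]
                else lines
  let kv := key ++ "=" ++ value ++ "\n"
  let stripped := lines1.map (fun l => PySem.Str.strip l)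
  let flags := flagsB header stripped false
  let tagged := stripped.zip flags
  match List.findIdx? (fun p => p.2 && isKeyLineB key p.1) tagged with
  | some k =>
      let kept := (((lines1.drop (k+1)).zip (tagged.drop (k+1))).filter
        (fun p => !(p.2.2 && isKeyLineB key p.2.1))).map (fun p => p.1)
      lines1.take k ++ kv :: kept
  | none =>
      -- the header line was ensured present above, so Source B's bare 'next(...)' cannot
      -- raise; '.getD 0' is its transliteration on that (never taken) none branch
      let i0 := (List.findIdx? (fun s => s == header) stripped).getD 0
      let j := match List.findIdx? (fun s => PySem.Str.startswith s "[" && !(s == header))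
                      (stripped.drop (i0 + 1)) with
        | some off => i0 + 1 + off
        | none => lines1.length
      lines1.take j ++ kv :: lines1.drop j

-- ===== PRECONDITION & SPEC =====
def Spec_update_key_in_lines (lines : List String) (section_ : String) (key : String) (value : String) (out : List String) : Prop := out = update_key_in_lines_alt lines section_ key value
instance (lines : List String) (section_ : String) (key : String) (value : String) (out : List String) : Decidable (Spec_update_key_in_lines lines section_ key value out) := by unfold Spec_update_key_in_lines; infer_instance

-- ===== CLAIM (what is proved, stated in full; the proofs are below) =====
def Claim_equal_update_key_in_lines : Prop := ∀ (lines : List String) (section_ : String) (key : String) (value : String), Dom_update_key_in_lines lines section_ key value → Spec_update_key_in_lines lines section_ key value (update_key_in_lines lines section_ key value)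

-- ===== LEMMAS AND PROOFS =====

-- once key_updated is true, the rest of A's first loop is exactly B's filter
set_option maxHeartbeats 1000000 in
theorem loopA_true (header key kv : String) :
    ∀ (L : List String) (c : Bool),
      loopA header key kv L c true =
        (((L.zip ((L.map (fun l => PySem.Str.strip l)).zip
              (flagsB header (L.map (fun l => PySem.Str.strip l)) c))).filter
            (fun p => !(p.2.2 && isKeyLineB key p.2.1))).map (fun p => p.1), true) := by
  intro L
  induction L with
  | nil => intro c; simp [loopA, flagsB]
  | cons l rest ih =>
    intro c
    conv_lhs => simp only [loopA]
    simp only [List.map_cons, flagsB, List.zip_cons_cons, List.filter_cons, isKeyLineB]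
    generalize (if (PySem.Str.startswith (PySem.Str.strip l) "[" && PySem.Str.endswith (PySem.Str.strip l) "]") = true then PySem.Str.strip l == header else c) = cur
    generalize PySem.Str.isIn "=" (PySem.Str.strip l) = b1
    generalize (PySem.Str.startswith (PySem.Str.strip l) "#" || PySem.Str.startswith (PySem.Str.strip l) ";") = b2
    generalize (PySem.Str.strip (((PySem.Str.splitMax? (PySem.Str.strip l) "=" 1).getD []).headD "") == key) = b3
    cases cur <;> cases b1 <;> cases b2 <;> cases b3 <;> simp [isKeyLineB, ih]

theorem ite_ite_same {α : Type} (a b : Bool) (X Z : α) :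
    (if a then (if b then X else Z) else Z) = if a && b then X else Z := by
  cases a <;> cases b <;> simp

-- A's first loop from key_updated = false is B's "splice at the first match" (or identity)
set_option maxHeartbeats 1000000 in
theorem loopA_false (header key kv : String) :
    ∀ (L : List String) (c : Bool),
      loopA header key kv L c false =
        match List.findIdx? (fun p => p.2 && isKeyLineB key p.1)
                ((L.map (fun l => PySem.Str.strip l)).zip
                  (flagsB header (L.map (fun l => PySem.Str.strip l)) c)) with
        | none => (L, false)
        | some k =>
            (L.take k ++ kv ::
              (((L.drop (k+1)).zip
                  (((L.map (fun l => PySem.Str.strip l)).zip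
                    (flagsB header (L.map (fun l => PySem.Str.strip l)) c)).drop (k+1))).filter
                (fun p => !(p.2.2 && isKeyLineB key p.2.1))).map (fun p => p.1), true) := by
  intro L
  induction L with
  | nil => intro c; simp [loopA, flagsB]
  | cons l rest ih =>
    intro c
    conv_lhs => simp only [loopA]
    simp only [List.map_cons, flagsB, List.zip_cons_cons, List.findIdx?_cons]
    simp only [Bool.not_false, if_true]
    generalize (if (PySem.Str.startswith (PySem.Str.strip l) "[" && PySem.Str.endswith (PySem.Str.strip l) "]") = true then PySem.Str.strip l == header else c) = cur
    rw [ite_ite_same]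
    have hpred : ((cur && PySem.Str.isIn "=" (PySem.Str.strip l) &&
        !(PySem.Str.startswith (PySem.Str.strip l) "#" || PySem.Str.startswith (PySem.Str.strip l) ";")) &&
        (PySem.Str.strip (((PySem.Str.splitMax? (PySem.Str.strip l) "=" 1).getD []).headD "") == key))
        = (cur && isKeyLineB key (PySem.Str.strip l)) := by
      simp only [isKeyLineB, Bool.and_assoc]
    rw [hpred]
    cases hkb : cur && isKeyLineB key (PySem.Str.strip l) with
    | true =>
      rw [loopA_true]
      simp
    | false =>
      rw [ih]
      cases h : List.findIdx? (fun p => p.2 && isKeyLineB key p.1)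
          ((rest.map (fun l => PySem.Str.strip l)).zip
            (flagsB header (rest.map (fun l => PySem.Str.strip l)) cur)) with
      | none => rfl
      | some k => simp [List.take_succ_cons, List.drop_succ_cons]

-- once 'added' is true, A's second loop copies the rest
theorem loopA2_added (header kv : String) :
    ∀ (L : List String) (t : Bool), loopA2 header kv L t true = L := by
  intro L
  induction L with
  | nil => intro t; simp [loopA2]
  | cons l rest ih =>
    intro t
    conv_lhs => simp only [loopA2]
    cases h1 : (PySem.Str.strip l == header) <;>
      cases h2 : (t && PySem.Str.startswith (PySem.Str.strip l) "[") <;>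
      simp [ih]

-- inside the target section, A's second loop splices kv before the first foreign header
set_option maxHeartbeats 1000000 in
theorem loopA2_in (header kv : String) :
    ∀ (L : List String),
      loopA2 header kv L true false =
        match List.findIdx? (fun l => PySem.Str.startswith (PySem.Str.strip l) "[" &&
                !(PySem.Str.strip l == header)) L with
        | none => L ++ [kv]
        | some t => L.take t ++ kv :: L.drop t := by
  intro L
  induction L with
  | nil => simp [loopA2]
  | cons l rest ih =>
    conv_lhs => simp only [loopA2]
    simp only [List.findIdx?_cons]
    cases h1 : (PySem.Str.strip l == header) <;>
      cases h2 : PySem.Str.startswith (PySem.Str.strip l) "[" <;>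
      cases h : List.findIdx? (fun l => PySem.Str.startswith (PySem.Str.strip l) "[" &&
          !(PySem.Str.strip l == header)) rest <;>
      simp only [ih, h, loopA2_added] <;>
      simp [List.take_succ_cons, List.drop_succ_cons]

-- before the target section, A's second loop copies up to (and including) the header line
set_option maxHeartbeats 1000000 in
theorem loopA2_out (header kv : String) :
    ∀ (L : List String),
      loopA2 header kv L false false =
        match List.findIdx? (fun l => PySem.Str.strip l == header) L with
        | none => L
        | some i0 => L.take (i0+1) ++ loopA2 header kv (L.drop (i0+1)) true false := by
  intro L
  induction L with
  | nil => simp [loopA2]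
  | cons l rest ih =>
    conv_lhs => simp only [loopA2]
    simp only [List.findIdx?_cons]
    cases h1 : (PySem.Str.strip l == header) <;>
      cases h : List.findIdx? (fun l => PySem.Str.strip l == header) rest <;>
      simp only [ih, h] <;>
      simp [List.take_succ_cons, List.drop_succ_cons]

-- the appended line "\n[section]\n" strips back to the header
theorem strip_appended (section_ : String) :
    PySem.Str.strip ("\n" ++ ("[" ++ section_ ++ "]") ++ "\n") = "[" ++ section_ ++ "]" := by
  have hs1 : PySem.Chars.isspace '\n' = true := by decide
  have hs2 : PySem.Chars.isspace '[' = false := by decide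
  have hs3 : PySem.Chars.isspace ']' = false := by decide
  have h : (PySem.Str.strip ("\n" ++ ("[" ++ section_ ++ "]") ++ "\n")).toList
      = ("[" ++ section_ ++ "]").toList := by
    simp only [PySem.Str.toList_strip, String.toList_append]
    show PySem.Chars.strip ('\n' :: (('[' :: section_.toList) ++ [']']) ++ ['\n']) = ('[' :: section_.toList) ++ [']']
    simp [PySem.Chars.strip, PySem.Chars.lstrip, PySem.Chars.rstrip,
      List.reverse_append, hs1, hs2, hs3]
  exact String.toList_inj.mp h

-- key step for a fixed line list L containing a header line
set_option maxHeartbeats 4000000 in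
theorem main_eq (header key kv : String) (L : List String)
    (hmem : ∃ l ∈ L, (PySem.Str.strip l == header) = true) :
    (let r := loopA header key kv L false false
     if !r.2 then loopA2 header kv r.1 false false else r.1) =
    (let stripped := L.map (fun l => PySem.Str.strip l)
     let flags := flagsB header stripped false
     let tagged := stripped.zip flags
     match List.findIdx? (fun p => p.2 && isKeyLineB key p.1) tagged with
     | some k =>
         let kept := (((L.drop (k+1)).zip (tagged.drop (k+1))).filter
           (fun p => !(p.2.2 && isKeyLineB key p.2.1))).map (fun p => p.1)
         L.take k ++ kv :: kept
     | none =>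
         let i0 := (List.findIdx? (fun s => s == header) (L.map (fun l => PySem.Str.strip l))).getD 0
         let j := match List.findIdx? (fun s => PySem.Str.startswith s "[" && !(s == header))
                         ((L.map (fun l => PySem.Str.strip l)).drop (i0 + 1)) with
           | some off => i0 + 1 + off
           | none => L.length
         L.take j ++ kv :: L.drop j) := by
  dsimp only
  rw [loopA_false]
  cases hfind : List.findIdx? (fun p => p.2 && isKeyLineB key p.1)
      ((L.map (fun l => PySem.Str.strip l)).zip
        (flagsB header (L.map (fun l => PySem.Str.strip l)) false)) with
  | some k => rfl
  | none =>
    show loopA2 header kv L false false = _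
    rw [loopA2_out]
    rw [List.findIdx?_map]
    have hcomp : ((fun s => s == header) ∘ (fun l => PySem.Str.strip l))
        = (fun l => PySem.Str.strip l == header) := rfl
    rw [hcomp]
    cases hh : List.findIdx? (fun l => PySem.Str.strip l == header) L with
    | none =>
      obtain ⟨w, hw, hweq⟩ := hmem
      have := List.findIdx?_eq_none_iff.mp hh w hw
      rw [hweq] at this; cases this
    | some i0 =>
      dsimp only [Option.getD_some]
      rw [loopA2_in]
      rw [← List.map_drop, List.findIdx?_map]
      have hcomp2 : ((fun s => PySem.Str.startswith s "[" && !(s == header)) ∘ (fun l => PySem.Str.strip l))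
          = (fun l => PySem.Str.startswith (PySem.Str.strip l) "[" && !(PySem.Str.strip l == header)) := rfl
      rw [hcomp2]
      cases hoff : List.findIdx? (fun l => PySem.Str.startswith (PySem.Str.strip l) "[" &&
          !(PySem.Str.strip l == header)) (L.drop (i0 + 1)) with
      | none =>
        show L.take (i0+1) ++ (L.drop (i0+1) ++ [kv]) = L.take L.length ++ kv :: L.drop L.length
        rw [List.take_length, List.drop_length, ← List.append_assoc, List.take_append_drop]
      | some off =>
        simp [List.take_add, List.drop_drop, List.append_assoc]

theorem a_eq_b : ∀ (lines : List String) (section_ : String) (key : String) (value : String),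
    update_key_in_lines lines section_ key value = update_key_in_lines_alt lines section_ key value := by
  intro lines section_ key value
  unfold update_key_in_lines update_key_in_lines_alt
  dsimp only
  rw [show (lines.all fun l => !(PySem.Str.strip l == "[" ++ section_ ++ "]"))
      = !(lines.any fun l => (PySem.Str.strip l == "[" ++ section_ ++ "]")) from
    List.not_any_eq_all_not.symm]
  cases hany : lines.any (fun l => PySem.Str.strip l == "[" ++ section_ ++ "]") with
  | true =>
    exact main_eq _ _ _ lines (by
      obtain ⟨w, hw, hweq⟩ := List.any_eq_true.mp hany
      exact ⟨w, hw, hweq⟩)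
  | false =>
    exact main_eq _ _ _ (lines ++ ["\n" ++ ("[" ++ section_ ++ "]") ++ "\n"]) (by
      refine ⟨"\n" ++ ("[" ++ section_ ++ "]") ++ "\n", by simp, ?_⟩
      rw [strip_appended]
      simp)

-- ===== VERDICT (by name: the statement is the Claim_ definition above) =====
theorem update_key_in_lines_spec : Claim_equal_update_key_in_lines := by
  intro lines section_ key value _
  unfold Spec_update_key_in_lines
  exact a_eq_b lines section_ key value
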